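-- pv_equiv track=rewrite | github.com/strallis/advent-of-code | 2022/day6.py | part1
-- ===== SOURCE A (Python) =====
-- def part1(data):
--     index = 4
--     marker = list(data[:index])
--     for i in data[index:]:
--         if i not in marker and len(marker) == len(set(marker)):
--             return index
--         else:
--             marker.pop(0)
--             marker.append(i)
--             index += 1
-- ===== SOURCE B (Python) =====
-- def part1(data):
--     for index in range(4, len(data)):
--         if len(set(data[index-4:index+1])) == 5:
--             return index
--     return None
-- ===== Notes on version B (the rewrite author's own statement) =====
-- stated objective: simpler
-- what changed: B drops the maintained 4-element sliding buffer (pop(0)/append and a manual index counter, with a two-part test that the incoming char is absent from the buffer and the buffer is duplicate-free) and instead loops an index over range(4, len(data)), testing the single 5-element slice data[index-4:index+1] for full distinctness with one set() call.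
import Mathlib
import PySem

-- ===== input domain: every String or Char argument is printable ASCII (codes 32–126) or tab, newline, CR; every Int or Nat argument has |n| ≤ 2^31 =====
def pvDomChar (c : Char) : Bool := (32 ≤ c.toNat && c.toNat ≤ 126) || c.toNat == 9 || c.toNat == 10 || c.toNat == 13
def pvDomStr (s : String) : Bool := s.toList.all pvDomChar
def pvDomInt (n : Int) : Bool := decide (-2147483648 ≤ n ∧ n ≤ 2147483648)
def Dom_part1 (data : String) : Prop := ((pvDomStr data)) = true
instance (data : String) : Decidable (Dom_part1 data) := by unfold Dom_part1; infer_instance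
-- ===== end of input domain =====

-- B replaces A's slid 4-char buffer (pop/append + split membership/distinctness test) with a
-- direct index loop testing one 5-wide slice for distinctness; objective: simpler.


-- ===== PORT A =====
-- for i in data[index:]: if i not in marker and len(marker)==len(set(marker)): return index
--                        else: marker.pop(0); marker.append(i); index += 1
-- marker.pop(0) is ported as 'marker.drop 1': the loop body only runs when data has > 4 chars,
-- so marker holds exactly 4 chars at every iteration and pop(0) never raises.
def part1Loop : List Char → List Char → Int → Option Int
  | [], _, _ => none
  | i :: rest, marker, index =>
    if (!(marker.contains i) && (marker.length == (PySem.Set.ofList marker).length)) then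
      some index
    else
      part1Loop rest (marker.drop 1 ++ [i]) (index + 1)

def part1 (data : String) : Option Int :=
  part1Loop (PySem.List.slice data.toList (some 4) none)  -- for i in data[4:]
    (PySem.List.slice data.toList none (some 4)) 4        -- marker = list(data[:4])

-- ===== PORT B =====
-- for index in range(4, len(data)): if len(set(data[index-4:index+1])) == 5: return index
def part1AltLoop (cs : List Char) : List Int → Option Int
  | [] => none
  | index :: rest =>
    if (PySem.Set.ofList (PySem.List.slice cs (some (index - 4)) (some (index + 1)))).length = 5 then
      some index
    else
      part1AltLoop cs rest

def part1_alt (data : String) : Option Int :=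
  part1AltLoop data.toList (PySem.List.pyRange 4 (data.toList.length : Int) 1)

-- ===== PRECONDITION & SPEC =====
def Spec_part1 (data : String) (out : Option Int) : Prop := out = part1_alt data
instance (data : String) (out : Option Int) : Decidable (Spec_part1 data out) := by unfold Spec_part1; infer_instance

-- ===== CLAIM (what is proved, stated in full; the proofs are below) =====
def Claim_equal_part1 : Prop := ∀ (data : String), Dom_part1 data → Spec_part1 data (part1 data)

-- ===== LEMMAS AND PROOFS =====

theorem nodup_append_singleton (m : List Char) (i : Char) :
    (m ++ [i]).Nodup ↔ m.Nodup ∧ i ∉ m := by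
  simp [List.nodup_append]; intro _; constructor
  · intro h hi; exact (h i hi) rfl
  · intro h a ha he; exact h (he ▸ ha)

theorem discard_lt (s : List Char) (x : Char) (hx : x ∈ s) :
    (PySem.Set.discard s x).length < s.length := by
  unfold PySem.Set.discard
  rw [List.length_filter_lt_length_iff_exists]
  exact ⟨x, hx, by simp⟩

-- len(set(m)) == len(m) exactly when m has no duplicates
theorem len_ofList_iff (m : List Char) :
    (PySem.Set.ofList m).length = m.length ↔ m.Nodup := by
  constructor
  · intro h
    induction m with
    | nil => simp
    | cons x xs ih =>
      rw [PySem.Set.ofList_cons] at h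
      simp only [List.length_cons] at h
      have h1 : (PySem.Set.discard (PySem.Set.ofList xs) x).length ≤ (PySem.Set.ofList xs).length := by
        unfold PySem.Set.discard; exact List.length_filter_le _ _
      have h2 := PySem.Set.length_ofList_le (xs := xs)
      have hlen : (PySem.Set.ofList xs).length = xs.length := by omega
      have hnd := ih hlen
      have hx : x ∉ xs := by
        intro hmem
        have hm : x ∈ PySem.Set.ofList xs := (PySem.Set.mem_ofList xs x).2 hmem
        have := discard_lt _ _ hm
        omega
      exact List.Nodup.cons hx hnd
  · intro h; rw [PySem.Set.ofList_eq_self_of_nodup (h := h)]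

-- A's split test on the 4-buffer equals B's distinctness test on the 5-window
theorem cond_iff (marker : List Char) (i : Char) (h4 : marker.length = 4) :
    ((!(marker.contains i) && (marker.length == (PySem.Set.ofList marker).length)) = true ↔
      (PySem.Set.ofList (marker ++ [i])).length = 5) := by
  have h5 : (marker ++ [i]).length = 5 := by simp [h4]
  rw [show (5 : Nat) = (marker ++ [i]).length from h5.symm, len_ofList_iff,
      nodup_append_singleton]
  simp only [Bool.and_eq_true, Bool.not_eq_true', beq_iff_eq]
  constructor
  · rintro ⟨hc, hl⟩
    exact ⟨(len_ofList_iff marker).1 hl.symm, by simpa using hc⟩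
  · rintro ⟨hnd, hni⟩
    exact ⟨by simpa using hni, ((len_ofList_iff marker).2 hnd).symm⟩

theorem loop_eq (rest : List Char) : ∀ (pre marker cs : List Char),
    marker.length = 4 → cs = pre ++ marker ++ rest →
    part1Loop rest marker ((pre.length : Int) + 4) =
      part1AltLoop cs (PySem.List.pyRange ((pre.length : Int) + 4) (cs.length : Int) 1) := by
  induction rest with
  | nil =>
    intro pre marker cs h4 hcs
    have hle : (cs.length : Int) ≤ (pre.length : Int) + 4 := by
      subst hcs; simp [h4]
    rw [PySem.List.pyRange_one_eq_nil hle]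
    rfl
  | cons i rest' ih =>
    intro pre marker cs h4 hcs
    have hlt : ((pre.length : Int) + 4) < (cs.length : Int) := by
      subst hcs; simp only [List.length_append, List.length_cons, h4]; omega
    rw [PySem.List.pyRange_one_cons hlt]
    show part1Loop (i :: rest') marker _ = part1AltLoop cs (_ :: _)
    have hslice : PySem.List.slice cs (some ((pre.length : Int) + 4 - 4))
        (some ((pre.length : Int) + 4 + 1)) = marker ++ [i] := by
      have e1 : ((pre.length : Int) + 4 - 4) = ((pre.length : Nat) : Int) := by ring
      have e2 : ((pre.length : Int) + 4 + 1) = ((pre.length + 5 : Nat) : Int) := by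
        push_cast; ring
      rw [e1, e2, PySem.List.slice_natCast, hcs, List.append_assoc,
          show pre.length + 5 - pre.length = 5 by omega, List.drop_left,
          show 5 = marker.length + 1 by omega, List.take_append]
      simp
    by_cases hc : (PySem.Set.ofList (marker ++ [i])).length = 5
    · have hca := (cond_iff marker i h4).2 hc
      simp only [part1Loop, part1AltLoop, hslice, hca, hc, if_true]
    · have hca : (!(marker.contains i) && (marker.length == (PySem.Set.ofList marker).length)) = false := by
        by_contra h
        exact hc ((cond_iff marker i h4).1 (by simpa using h))
      obtain ⟨m0, mt, rfl⟩ : ∃ m0 mt, marker = m0 :: mt := by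
        cases marker with
        | nil => simp at h4
        | cons a b => exact ⟨a, b, rfl⟩
      simp only [part1Loop, part1AltLoop, hslice, hca, hc, if_false, Bool.false_eq_true,
        List.drop_succ_cons, List.drop_zero]
      have h4' : (mt ++ [i]).length = 4 := by simp at h4 ⊢; omega
      have hcs' : cs = (pre ++ [m0]) ++ (mt ++ [i]) ++ rest' := by
        simp [hcs]
      have := ih (pre ++ [m0]) (mt ++ [i]) cs h4' hcs'
      have elen : (((pre ++ [m0]).length : Nat) : Int) + 4 = (pre.length : Int) + 4 + 1 := by
        simp; ring
      rw [elen] at this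
      exact this

-- ===== VERDICT (by name: the statement is the Claim_ definition above) =====
theorem part1_spec : Claim_equal_part1 := by
  intro data _
  unfold Spec_part1 part1 part1_alt
  set cs := data.toList with hcs
  have e1 : PySem.List.slice cs (some 4) none = cs.drop 4 := by simp [pysem]
  have e2 : PySem.List.slice cs none (some 4) = cs.take 4 := by simp [pysem]
  rw [e1, e2]
  by_cases h : cs.length < 4
  · rw [List.drop_eq_nil_of_le (by omega)]
    rw [PySem.List.pyRange_one_eq_nil (by exact_mod_cast h.le)]
    rfl
  · have h4 : (cs.take 4).length = 4 := by simp; omega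
    have := loop_eq (cs.drop 4) [] (cs.take 4) cs h4 (by simp)
    simpa using this
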